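-- pv_equiv track=rewrite | github.com/RichardScottOZ/ADnD1e-Random-Dungeon-Generator | enhanced_mapper.py | get_cell_colors
-- ===== SOURCE A (Python) =====
-- def get_cell_colors(cell_value):
--     """Return fill and stroke colors for a cell based on its value."""
--     # Default colors
--     fill = '#1a1a1a'  # Dark background (empty/void)
--     stroke = '#333333'
--
--     if cell_value == 'B':
--         # Black/void
--         fill = '#0a0a0a'
--         stroke = '#000000'
--     elif cell_value == 'O':
--         # Outside entrance - green
--         fill = '#2d5016'
--         stroke = '#4a7c2a'
--     elif 'R' in cell_value:
--         # Room - gray with potential treasure colors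
--         if 'c' in cell_value:
--             fill = '#8b4513'  # Copper
--         elif 'g' in cell_value:
--             fill = '#b8860b'  # Gold
--         elif 'p' in cell_value:
--             fill = '#c0c0c0'  # Platinum
--         elif 's' in cell_value and 'sd' not in cell_value:
--             fill = '#778899'  # Silver
--         elif 'e' in cell_value:
--             fill = '#9acd32'  # Electrum
--         elif 'G' in cell_value:
--             fill = '#00ced1'  # Gems
--         elif 'j' in cell_value:
--             fill = '#dc143c'  # Jewellery
--         elif 'M' in cell_value:
--             fill = '#ff1493'  # Magic
--         elif 'm' in cell_value:
--             fill = '#8b0000'  # Monster - dark red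
--         else:
--             fill = '#4a4a4a'  # Regular room
--         stroke = '#6a6a6a'
--     elif 'C' in cell_value:
--         # Corridor
--         fill = '#2f2f2f'
--         stroke = '#4a4a4a'
--     elif 'D' in cell_value:
--         # Dead end
--         fill = '#654321'
--         stroke = '#8b5a2b'
--     elif 'CH' in cell_value:
--         # Chasm
--         fill = '#1c1c1c'
--         stroke = '#3c3c3c'
--     elif any(x in cell_value for x in ['P', 'L', 'W', 'S', 'br', 'bn', 'bo', 'ri']):
--         # Water features
--         fill = '#1e3a5f'
--         stroke = '#2e5a8f'
--     elif any(x in cell_value for x in ['st', 'ch', 'cm', 'td']):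
--         # Vertical movement (stairs, chutes, etc.)
--         fill = '#8b4789'
--         stroke = '#ab67a9'
--     elif any(x in cell_value for x in ['pi', 'pt', 'ps', 'pc', 'el', 'ar', 'sp', 'df', 'sf', 'gs', 'bw', 'ol']):
--         # Traps
--         fill = '#8b0000'
--         stroke = '#cd0000'
--
--     return fill, stroke
-- ===== SOURCE B (Python) =====
-- # Single-pass rewrite: tokenize the string once (each character and each
-- # adjacent character pair), fold the minimum priority rank of any token seen,
-- # then map the winning rank to its colors via small tables.
--
-- _EXACT = {'B': ('#0a0a0a', '#000000'), 'O': ('#2d5016', '#4a7c2a')}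
--
-- # rank 3 ('CH') is unreachable in the original chain ('C' always wins first),
-- # so no token carries it.
-- _CHAR_RANK = {'R': 0, 'C': 1, 'D': 2, 'P': 4, 'L': 4, 'W': 4, 'S': 4}
-- _PAIR_RANK = {('b', 'r'): 4, ('b', 'n'): 4, ('b', 'o'): 4, ('r', 'i'): 4,
--               ('s', 't'): 5, ('c', 'h'): 5, ('c', 'm'): 5, ('t', 'd'): 5,
--               ('p', 'i'): 6, ('p', 't'): 6, ('p', 's'): 6, ('p', 'c'): 6,
--               ('e', 'l'): 6, ('a', 'r'): 6, ('s', 'p'): 6, ('d', 'f'): 6,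
--               ('s', 'f'): 6, ('g', 's'): 6, ('b', 'w'): 6, ('o', 'l'): 6}
--
-- _RANK_COLORS = {1: ('#2f2f2f', '#4a4a4a'), 2: ('#654321', '#8b5a2b'),
--                 4: ('#1e3a5f', '#2e5a8f'), 5: ('#8b4789', '#ab67a9'),
--                 6: ('#8b0000', '#cd0000')}
--
-- # silver ('s', rank 3) is handled by flags, not by the table
-- _TREASURE_RANK = {'c': 0, 'g': 1, 'p': 2, 'e': 4, 'G': 5, 'j': 6, 'M': 7, 'm': 8}
-- _TREASURE_FILL = {0: '#8b4513', 1: '#b8860b', 2: '#c0c0c0', 3: '#778899',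
--                   4: '#9acd32', 5: '#00ced1', 6: '#dc143c', 7: '#ff1493',
--                   8: '#8b0000'}
--
--
-- def get_cell_colors(cell_value):
--     """Return fill and stroke colors for a cell based on its value."""
--     if cell_value in _EXACT:
--         return _EXACT[cell_value]
--     best = 7       # minimal rule rank seen (7 = none)
--     tbest = 9      # minimal treasure rank seen, silver excluded (9 = none)
--     has_s = False  # 's' occurs
--     has_sd = False # 'sd' occurs
--     prev = None
--     for ch in cell_value:
--         best = min(best, _CHAR_RANK.get(ch, 7))
--         tbest = min(tbest, _TREASURE_RANK.get(ch, 9))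
--         if ch == 's':
--             has_s = True
--         if prev is not None:
--             best = min(best, _PAIR_RANK.get((prev, ch), 7))
--             if (prev, ch) == ('s', 'd'):
--                 has_sd = True
--         prev = ch
--     if best == 0:
--         eff = min(tbest, 3) if (has_s and not has_sd) else tbest
--         return _TREASURE_FILL.get(eff, '#4a4a4a'), '#6a6a6a'
--     return _RANK_COLORS.get(best, ('#1a1a1a', '#333333'))
-- ===== Notes on version B (the rewrite author's own statement) =====
-- stated objective: alternative
-- what changed: Replaces A's if/elif chain of repeated substring scans by a single left-to-right pass that looks up each character and each adjacent character pair in priority-rank tables, folds the minimum rank seen (plus 's'/'sd' flags for the silver rule), and finally maps the winning rank to its colors through small tables.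
import Mathlib
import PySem

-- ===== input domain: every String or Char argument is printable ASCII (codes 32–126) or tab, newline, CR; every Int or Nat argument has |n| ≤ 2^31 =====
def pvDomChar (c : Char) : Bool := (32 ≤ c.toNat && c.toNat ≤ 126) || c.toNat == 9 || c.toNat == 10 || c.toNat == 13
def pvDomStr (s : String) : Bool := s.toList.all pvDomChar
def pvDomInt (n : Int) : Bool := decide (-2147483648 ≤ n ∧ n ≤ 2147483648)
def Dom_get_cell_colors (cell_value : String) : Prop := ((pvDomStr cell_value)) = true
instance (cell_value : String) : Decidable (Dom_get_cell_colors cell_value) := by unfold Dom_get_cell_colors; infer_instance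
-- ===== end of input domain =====

-- B replaces A's chain of repeated substring scans by ONE left-to-right pass that
-- folds the minimal priority rank of every character/adjacent-pair token seen,
-- then maps the winning rank to colors through small tables; objective: alternative.

-- ===== PORT A =====
-- literal transliteration of A's if/elif chain over fill/stroke
def get_cell_colors (cell_value : String) : String × String :=
  if cell_value == "B" then ("#0a0a0a", "#000000")
  else if cell_value == "O" then ("#2d5016", "#4a7c2a")
  else if PySem.Str.isIn "R" cell_value then
    (if PySem.Str.isIn "c" cell_value then "#8b4513"
     else if PySem.Str.isIn "g" cell_value then "#b8860b"
     else if PySem.Str.isIn "p" cell_value then "#c0c0c0"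
     else if PySem.Str.isIn "s" cell_value && !(PySem.Str.isIn "sd" cell_value) then "#778899"
     else if PySem.Str.isIn "e" cell_value then "#9acd32"
     else if PySem.Str.isIn "G" cell_value then "#00ced1"
     else if PySem.Str.isIn "j" cell_value then "#dc143c"
     else if PySem.Str.isIn "M" cell_value then "#ff1493"
     else if PySem.Str.isIn "m" cell_value then "#8b0000"
     else "#4a4a4a", "#6a6a6a")
  else if PySem.Str.isIn "C" cell_value then ("#2f2f2f", "#4a4a4a")
  else if PySem.Str.isIn "D" cell_value then ("#654321", "#8b5a2b")
  else if PySem.Str.isIn "CH" cell_value then ("#1c1c1c", "#3c3c3c")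
  else if ["P", "L", "W", "S", "br", "bn", "bo", "ri"].any
            (fun x => PySem.Str.isIn x cell_value) then ("#1e3a5f", "#2e5a8f")
  else if ["st", "ch", "cm", "td"].any
            (fun x => PySem.Str.isIn x cell_value) then ("#8b4789", "#ab67a9")
  else if ["pi", "pt", "ps", "pc", "el", "ar", "sp", "df", "sf", "gs", "bw", "ol"].any
            (fun x => PySem.Str.isIn x cell_value) then ("#8b0000", "#cd0000")
  else ("#1a1a1a", "#333333")

-- ===== PORT B =====
def pvExact : PySem.Dict String (String × String) :=
  PySem.Dict.ofList [("B", ("#0a0a0a", "#000000")), ("O", ("#2d5016", "#4a7c2a"))]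

-- rank 3 ('CH') is unreachable in the original chain ('C' always wins first)
def pvCharRank : PySem.Dict Char Int :=
  PySem.Dict.ofList [('R', 0), ('C', 1), ('D', 2), ('P', 4), ('L', 4), ('W', 4), ('S', 4)]

def pvPairRank : PySem.Dict (Char × Char) Int :=
  PySem.Dict.ofList [(('b','r'),4), (('b','n'),4), (('b','o'),4), (('r','i'),4),
    (('s','t'),5), (('c','h'),5), (('c','m'),5), (('t','d'),5),
    (('p','i'),6), (('p','t'),6), (('p','s'),6), (('p','c'),6),
    (('e','l'),6), (('a','r'),6), (('s','p'),6), (('d','f'),6),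
    (('s','f'),6), (('g','s'),6), (('b','w'),6), (('o','l'),6)]

def pvRankColors : PySem.Dict Int (String × String) :=
  PySem.Dict.ofList [(1, ("#2f2f2f", "#4a4a4a")), (2, ("#654321", "#8b5a2b")),
    (4, ("#1e3a5f", "#2e5a8f")), (5, ("#8b4789", "#ab67a9")), (6, ("#8b0000", "#cd0000"))]

-- silver ('s', rank 3) is handled by the flags, not by the table
def pvTreasureRank : PySem.Dict Char Int :=
  PySem.Dict.ofList [('c',0), ('g',1), ('p',2), ('e',4), ('G',5), ('j',6), ('M',7), ('m',8)]

def pvTreasureFill : PySem.Dict Int String :=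
  PySem.Dict.ofList [(0,"#8b4513"),(1,"#b8860b"),(2,"#c0c0c0"),(3,"#778899"),
    (4,"#9acd32"),(5,"#00ced1"),(6,"#dc143c"),(7,"#ff1493"),(8,"#8b0000")]

-- loop body of B's single pass (state: best, tbest, has_s, has_sd, prev)
def pvStep (st : Int × Int × Bool × Bool × Option Char) (ch : Char) :
    Int × Int × Bool × Bool × Option Char :=
  let (best, tbest, has_s, has_sd, prev) := st
  let best := min best (pvCharRank.getD ch 7)
  let tbest := min tbest (pvTreasureRank.getD ch 9)
  let has_s := if ch == 's' then true else has_s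
  match prev with
  | some p =>
      (min best (pvPairRank.getD (p, ch) 7), tbest, has_s,
       (if (p, ch) == ('s', 'd') then true else has_sd), some ch)
  | none => (best, tbest, has_s, has_sd, some ch)

def get_cell_colors_alt (cell_value : String) : String × String :=
  match pvExact.get? cell_value with
  | some colors => colors
  | none =>
    let st := cell_value.toList.foldl pvStep (7, 9, false, false, none)
    let (best, tbest, has_s, has_sd, _) := st
    if best == 0 then
      let eff := if has_s && !has_sd then min tbest 3 else tbest
      (pvTreasureFill.getD eff "#4a4a4a", "#6a6a6a")
    else
      pvRankColors.getD best ("#1a1a1a", "#333333")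

-- ===== PRECONDITION & SPEC =====
def Spec_get_cell_colors (cell_value : String) (out : String × String) : Prop := out = get_cell_colors_alt cell_value
instance (cell_value : String) (out : String × String) : Decidable (Spec_get_cell_colors cell_value out) := by unfold Spec_get_cell_colors; infer_instance

-- ===== CLAIM (what is proved, stated in full; the proofs are below) =====
def Claim_equal_get_cell_colors : Prop := ∀ (cell_value : String), Dom_get_cell_colors cell_value → Spec_get_cell_colors cell_value (get_cell_colors cell_value)



-- ===== LEMMAS AND PROOFS =====

-- proof-side spec functions for B's single pass
def pvBest : Option Char → List Char → Int
  | _, [] => 7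
  | none, c :: cs => min (pvCharRank.getD c 7) (pvBest (some c) cs)
  | some p, c :: cs => min (min (pvCharRank.getD c 7) (pvPairRank.getD (p, c) 7)) (pvBest (some c) cs)

def pvTB : List Char → Int
  | [] => 9
  | c :: cs => min (pvTreasureRank.getD c 9) (pvTB cs)

def pvHasS : List Char → Bool
  | [] => false
  | c :: cs => ((c == 's') || pvHasS cs)

def pvHasSD : Option Char → List Char → Bool
  | _, [] => false
  | none, c :: cs => pvHasSD (some c) cs
  | some p, c :: cs => (((p, c) == ('s', 'd')) || pvHasSD (some c) cs)

def pvPairs : Option Char → List Char → List (Char × Char)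
  | _, [] => []
  | none, c :: cs => pvPairs (some c) cs
  | some p, c :: cs => (p, c) :: pvPairs (some c) cs

def pvLast : Option Char → List Char → Option Char
  | prev, [] => prev
  | _, c :: cs => pvLast (some c) cs

theorem pv_if_bool_or (b x : Bool) : (if b then true else x) = (b || x) := by
  cases b <;> simp

theorem pv_fold_spec : ∀ (V : List Char) (b t : Int) (hs hsd : Bool) (prev : Option Char),
    b ≤ 7 → t ≤ 9 →
    V.foldl pvStep (b, t, hs, hsd, prev)
      = (min b (pvBest prev V), min t (pvTB V), hs || pvHasS V, hsd || pvHasSD prev V,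
         pvLast prev V) := by
  intro V
  induction V with
  | nil =>
    intro b t hs hsd prev hb ht
    cases prev <;> simp [pvBest, pvTB, pvHasS, pvHasSD, pvLast] <;> omega
  | cons c cs ih =>
    intro b t hs hsd prev hb ht
    cases prev with
    | none =>
      rw [List.foldl_cons]
      show List.foldl pvStep
        (min b (pvCharRank.getD c 7), min t (pvTreasureRank.getD c 9),
         (if c == 's' then true else hs), hsd, some c) cs = _
      rw [ih _ _ _ _ _ (by omega) (by omega), pv_if_bool_or]
      have e1 : min (min b (pvCharRank.getD c 7)) (pvBest (some c) cs)
          = min b (pvBest none (c :: cs)) := by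
        show _ = min b (min (pvCharRank.getD c 7) (pvBest (some c) cs)); omega
      have e2 : min (min t (pvTreasureRank.getD c 9)) (pvTB cs) = min t (pvTB (c :: cs)) := by
        show _ = min t (min (pvTreasureRank.getD c 9) (pvTB cs)); omega
      have e3 : (((c == 's') || hs) || pvHasS cs) = (hs || pvHasS (c :: cs)) := by
        show _ = (hs || ((c == 's') || pvHasS cs))
        cases hs <;> cases (c == 's') <;> simp
      exact congrArg₂ Prod.mk e1 (congrArg₂ Prod.mk e2 (congrArg₂ Prod.mk e3 rfl))
    | some p =>
      rw [List.foldl_cons]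
      show List.foldl pvStep
        (min (min b (pvCharRank.getD c 7)) (pvPairRank.getD (p, c) 7),
         min t (pvTreasureRank.getD c 9),
         (if c == 's' then true else hs),
         (if (p, c) == ('s', 'd') then true else hsd), some c) cs = _
      rw [ih _ _ _ _ _ (by omega) (by omega), pv_if_bool_or, pv_if_bool_or]
      have e1 : min (min (min b (pvCharRank.getD c 7)) (pvPairRank.getD (p, c) 7))
            (pvBest (some c) cs) = min b (pvBest (some p) (c :: cs)) := by
        show _ = min b (min (min (pvCharRank.getD c 7) (pvPairRank.getD (p, c) 7))
          (pvBest (some c) cs)); omega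
      have e2 : min (min t (pvTreasureRank.getD c 9)) (pvTB cs) = min t (pvTB (c :: cs)) := by
        show _ = min t (min (pvTreasureRank.getD c 9) (pvTB cs)); omega
      have e3 : (((c == 's') || hs) || pvHasS cs) = (hs || pvHasS (c :: cs)) := by
        show _ = (hs || ((c == 's') || pvHasS cs))
        cases hs <;> cases (c == 's') <;> simp
      have e4 : ((((p, c) == ('s', 'd')) || hsd) || pvHasSD (some c) cs)
          = (hsd || pvHasSD (some p) (c :: cs)) := by
        show _ = (hsd || (((p, c) == ('s', 'd')) || pvHasSD (some c) cs))
        cases hsd <;> cases ((p, c) == ('s', 'd')) <;> simp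
      exact congrArg₂ Prod.mk e1 (congrArg₂ Prod.mk e2
        (congrArg₂ Prod.mk e3 (congrArg₂ Prod.mk e4 rfl)))

-- value classification of the three rank tables, without any case split on characters
theorem pv_crk_cases (c : Char) :
    (c = 'R' ∧ pvCharRank.getD c 7 = 0) ∨ (c = 'C' ∧ pvCharRank.getD c 7 = 1) ∨
    (c = 'D' ∧ pvCharRank.getD c 7 = 2) ∨
    (c ∈ (['P', 'L', 'W', 'S'] : List Char) ∧ pvCharRank.getD c 7 = 4) ∨
    (pvCharRank.getD c 7 = 7) := by
  by_cases h1 : c = 'R'; · exact Or.inl ⟨h1, by subst h1; decide⟩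
  by_cases h2 : c = 'C'; · exact Or.inr (Or.inl ⟨h2, by subst h2; decide⟩)
  by_cases h3 : c = 'D'; · exact Or.inr (Or.inr (Or.inl ⟨h3, by subst h3; decide⟩))
  by_cases h4 : c ∈ (['P', 'L', 'W', 'S'] : List Char)
  · refine Or.inr (Or.inr (Or.inr (Or.inl ⟨h4, ?_⟩)))
    simp only [List.mem_cons, List.not_mem_nil, or_false] at h4
    rcases h4 with rfl | rfl | rfl | rfl <;> decide
  · refine Or.inr (Or.inr (Or.inr (Or.inr ?_)))
    have hc : pvCharRank.contains c = false := by
      simp only [List.mem_cons, List.not_mem_nil, or_false, not_or] at h4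
      simp [pvCharRank, PySem.Dict.ofList, PySem.Dict.update, List.foldl,
        PySem.Dict.contains_insert, PySem.Dict.contains_empty,
        h1, h2, h3, h4.1, h4.2.1, h4.2.2.1, h4.2.2.2]
    exact PySem.Dict.getD_of_not_contains _ _ hc

theorem pv_trk_cases (c : Char) :
    (c = 'c' ∧ pvTreasureRank.getD c 9 = 0) ∨ (c = 'g' ∧ pvTreasureRank.getD c 9 = 1) ∨
    (c = 'p' ∧ pvTreasureRank.getD c 9 = 2) ∨ (c = 'e' ∧ pvTreasureRank.getD c 9 = 4) ∨
    (c = 'G' ∧ pvTreasureRank.getD c 9 = 5) ∨ (c = 'j' ∧ pvTreasureRank.getD c 9 = 6) ∨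
    (c = 'M' ∧ pvTreasureRank.getD c 9 = 7) ∨ (c = 'm' ∧ pvTreasureRank.getD c 9 = 8) ∨
    (pvTreasureRank.getD c 9 = 9) := by
  by_cases h1 : c = 'c'; · exact Or.inl ⟨h1, by subst h1; decide⟩
  by_cases h2 : c = 'g'; · exact Or.inr (Or.inl ⟨h2, by subst h2; decide⟩)
  by_cases h3 : c = 'p'; · exact Or.inr (Or.inr (Or.inl ⟨h3, by subst h3; decide⟩))
  by_cases h4 : c = 'e'; · exact Or.inr (Or.inr (Or.inr (Or.inl ⟨h4, by subst h4; decide⟩)))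
  by_cases h5 : c = 'G'
  · exact Or.inr (Or.inr (Or.inr (Or.inr (Or.inl ⟨h5, by subst h5; decide⟩))))
  by_cases h6 : c = 'j'
  · exact Or.inr (Or.inr (Or.inr (Or.inr (Or.inr (Or.inl ⟨h6, by subst h6; decide⟩)))))
  by_cases h7 : c = 'M'
  · exact Or.inr (Or.inr (Or.inr (Or.inr (Or.inr (Or.inr (Or.inl ⟨h7, by subst h7; decide⟩))))))
  by_cases h8 : c = 'm'
  · exact Or.inr (Or.inr (Or.inr (Or.inr (Or.inr (Or.inr (Or.inr (Or.inl ⟨h8, by subst h8; decide⟩)))))))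
  refine Or.inr (Or.inr (Or.inr (Or.inr (Or.inr (Or.inr (Or.inr (Or.inr ?_)))))))
  have hc : pvTreasureRank.contains c = false := by
    simp [pvTreasureRank, PySem.Dict.ofList, PySem.Dict.update, List.foldl,
      PySem.Dict.contains_insert, PySem.Dict.contains_empty,
      h1, h2, h3, h4, h5, h6, h7, h8]
  exact PySem.Dict.getD_of_not_contains _ _ hc

theorem pv_prk_cases (pr : Char × Char) :
    (pr ∈ ([('b','r'), ('b','n'), ('b','o'), ('r','i')] : List (Char × Char)) ∧
        pvPairRank.getD pr 7 = 4) ∨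
    (pr ∈ ([('s','t'), ('c','h'), ('c','m'), ('t','d')] : List (Char × Char)) ∧
        pvPairRank.getD pr 7 = 5) ∨
    (pr ∈ ([('p','i'), ('p','t'), ('p','s'), ('p','c'), ('e','l'), ('a','r'), ('s','p'),
            ('d','f'), ('s','f'), ('g','s'), ('b','w'), ('o','l')] : List (Char × Char)) ∧
        pvPairRank.getD pr 7 = 6) ∨
    (pvPairRank.getD pr 7 = 7) := by
  by_cases h1 : pr ∈ ([('b','r'), ('b','n'), ('b','o'), ('r','i')] : List (Char × Char))
  · refine Or.inl ⟨h1, ?_⟩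
    simp only [List.mem_cons, List.not_mem_nil, or_false] at h1
    rcases h1 with rfl | rfl | rfl | rfl <;> decide
  by_cases h2 : pr ∈ ([('s','t'), ('c','h'), ('c','m'), ('t','d')] : List (Char × Char))
  · refine Or.inr (Or.inl ⟨h2, ?_⟩)
    simp only [List.mem_cons, List.not_mem_nil, or_false] at h2
    rcases h2 with rfl | rfl | rfl | rfl <;> decide
  by_cases h3 : pr ∈ ([('p','i'), ('p','t'), ('p','s'), ('p','c'), ('e','l'), ('a','r'),
      ('s','p'), ('d','f'), ('s','f'), ('g','s'), ('b','w'), ('o','l')] : List (Char × Char))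
  · refine Or.inr (Or.inr (Or.inl ⟨h3, ?_⟩))
    simp only [List.mem_cons, List.not_mem_nil, or_false] at h3
    rcases h3 with rfl | rfl | rfl | rfl | rfl | rfl | rfl | rfl | rfl | rfl | rfl | rfl <;> decide
  refine Or.inr (Or.inr (Or.inr ?_))
  have hc : pvPairRank.contains pr = false := by
    simp only [List.mem_cons, List.not_mem_nil, or_false, not_or] at h1 h2 h3
    obtain ⟨a1, a2, a3, a4⟩ := h1
    obtain ⟨b1, b2, b3, b4⟩ := h2
    obtain ⟨c1, c2, c3, c4, c5, c6, c7, c8, c9, c10, c11, c12⟩ := h3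
    simp [pvPairRank, PySem.Dict.ofList, PySem.Dict.update, List.foldl,
      PySem.Dict.contains_insert, PySem.Dict.contains_empty,
      a1, a2, a3, a4, b1, b2, b3, b4, c1, c2, c3, c4, c5, c6, c7, c8, c9, c10, c11, c12]
  exact PySem.Dict.getD_of_not_contains _ _ hc

theorem pv_crk_nonneg (c : Char) : 0 ≤ pvCharRank.getD c 7 := by
  rcases pv_crk_cases c with ⟨_, h⟩ | ⟨_, h⟩ | ⟨_, h⟩ | ⟨_, h⟩ | h <;> omega
theorem pv_trk_nonneg (c : Char) : 0 ≤ pvTreasureRank.getD c 9 := by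
  rcases pv_trk_cases c with ⟨_, h⟩ | ⟨_, h⟩ | ⟨_, h⟩ | ⟨_, h⟩ | ⟨_, h⟩ | ⟨_, h⟩ | ⟨_, h⟩ | ⟨_, h⟩ | h <;> omega
theorem pv_prk_nonneg (pr : Char × Char) : 0 ≤ pvPairRank.getD pr 7 := by
  rcases pv_prk_cases pr with ⟨_, h⟩ | ⟨_, h⟩ | ⟨_, h⟩ | h <;> omega

-- bounds for the accumulators
theorem pvBest_le7 : ∀ (prev : Option Char) (V : List Char), pvBest prev V ≤ 7 := by
  intro prev V
  induction V generalizing prev with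
  | nil => cases prev <;> simp [pvBest]
  | cons c cs ih => cases prev <;> exact le_trans (min_le_right _ _) (ih _)

theorem pvBest_nonneg : ∀ (prev : Option Char) (V : List Char), 0 ≤ pvBest prev V := by
  intro prev V
  induction V generalizing prev with
  | nil => cases prev <;> simp [pvBest]
  | cons c cs ih =>
    cases prev with
    | none => exact le_min (pv_crk_nonneg c) (ih _)
    | some p => exact le_min (le_min (pv_crk_nonneg c) (pv_prk_nonneg _)) (ih _)

theorem pvTB_le9 : ∀ V : List Char, pvTB V ≤ 9 := by
  intro V
  induction V with
  | nil => simp [pvTB]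
  | cons c cs ih => exact le_trans (min_le_right _ _) ih

theorem pvTB_nonneg : ∀ V : List Char, 0 ≤ pvTB V := by
  intro V
  induction V with
  | nil => simp [pvTB]
  | cons c cs ih => exact le_min (pv_trk_nonneg c) ih

-- threshold characterisations
theorem pvBest_le_iff (k : Int) (hk : k < 7) : ∀ (prev : Option Char) (V : List Char),
    pvBest prev V ≤ k ↔
      ((∃ c ∈ V, pvCharRank.getD c 7 ≤ k) ∨ (∃ pr ∈ pvPairs prev V, pvPairRank.getD pr 7 ≤ k)) := by
  intro prev V
  induction V generalizing prev with
  | nil => cases prev <;> simp [pvBest, pvPairs] <;> omega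
  | cons c cs ih =>
    cases prev with
    | none =>
      show min (pvCharRank.getD c 7) (pvBest (some c) cs) ≤ k ↔ _
      rw [min_le_iff, ih (some c)]
      show _ ↔ ((∃ x ∈ c :: cs, pvCharRank.getD x 7 ≤ k) ∨
        (∃ pr ∈ pvPairs (some c) cs, pvPairRank.getD pr 7 ≤ k))
      simp only [List.exists_mem_cons_iff]
      exact or_assoc.symm
    | some p =>
      show min (min (pvCharRank.getD c 7) (pvPairRank.getD (p, c) 7)) (pvBest (some c) cs) ≤ k ↔ _
      rw [min_le_iff, min_le_iff, ih (some c)]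
      show _ ↔ ((∃ x ∈ c :: cs, pvCharRank.getD x 7 ≤ k) ∨
        (∃ pr ∈ (p, c) :: pvPairs (some c) cs, pvPairRank.getD pr 7 ≤ k))
      simp only [List.exists_mem_cons_iff]
      constructor
      · rintro ((h | h) | h | h)
        exacts [Or.inl (Or.inl h), Or.inr (Or.inl h), Or.inl (Or.inr h), Or.inr (Or.inr h)]
      · rintro ((h | h) | h | h)
        exacts [Or.inl (Or.inl h), Or.inr (Or.inl h), Or.inl (Or.inr h), Or.inr (Or.inr h)]

theorem pvTB_le_iff (k : Int) (hk : k < 9) : ∀ V : List Char,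
    pvTB V ≤ k ↔ (∃ c ∈ V, pvTreasureRank.getD c 9 ≤ k) := by
  intro V
  induction V with
  | nil => simp [pvTB]; omega
  | cons c cs ih =>
    show min (pvTreasureRank.getD c 9) (pvTB cs) ≤ k ↔ _
    rw [min_le_iff, ih]
    simp only [List.exists_mem_cons_iff]

theorem pvHasS_iff (V : List Char) : pvHasS V = true ↔ 's' ∈ V := by
  induction V with
  | nil => simp [pvHasS]
  | cons c cs ih =>
    show ((c == 's') || pvHasS cs) = true ↔ 's' ∈ c :: cs
    simp only [Bool.or_eq_true, beq_iff_eq, ih, List.mem_cons]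
    constructor
    · rintro (h | h); exacts [Or.inl h.symm, Or.inr h]
    · rintro (h | h); exacts [Or.inl h.symm, Or.inr h]

theorem pvHasSD_iff : ∀ (prev : Option Char) (V : List Char),
    pvHasSD prev V = true ↔ ('s', 'd') ∈ pvPairs prev V := by
  intro prev V
  induction V generalizing prev with
  | nil => cases prev <;> simp [pvHasSD, pvPairs]
  | cons c cs ih =>
    cases prev with
    | none => simp only [pvHasSD, pvPairs, ih]
    | some p =>
      show (((p, c) == ('s', 'd')) || pvHasSD (some c) cs) = true ↔
        ('s', 'd') ∈ (p, c) :: pvPairs (some c) cs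
      simp only [Bool.or_eq_true, beq_iff_eq, ih, List.mem_cons]
      constructor
      · rintro (h | h); exacts [Or.inl h.symm, Or.inr h]
      · rintro (h | h); exacts [Or.inl h.symm, Or.inr h]

theorem pvHasS_eq (V : List Char) : pvHasS V = decide ('s' ∈ V) := by
  apply Bool.eq_iff_iff.mpr; simp [pvHasS_iff]

theorem pvHasSD_eq (V : List Char) : pvHasSD none V = decide (('s', 'd') ∈ pvPairs none V) := by
  apply Bool.eq_iff_iff.mpr; simp [pvHasSD_iff]

-- pairs = zip with the tail
theorem pvPairs_some_eq_zip : ∀ (V : List Char) (p : Char), pvPairs (some p) V = (p :: V).zip V := by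
  intro V
  induction V with
  | nil => intro p; simp [pvPairs]
  | cons c cs ih => intro p; simp [pvPairs, List.zip, ih c]

theorem pvPairs_none_eq_zip (V : List Char) : pvPairs none V = V.zip V.tail := by
  cases V with
  | nil => simp [pvPairs]
  | cons c cs => simpa [pvPairs] using pvPairs_some_eq_zip cs c

theorem pv_pair_mem_left {x y : Char} {V : List Char} (h : (x, y) ∈ pvPairs none V) : x ∈ V := by
  rw [pvPairs_none_eq_zip] at h
  exact (List.of_mem_zip h).1

-- substring bridges
theorem pv_infix_single (c : Char) (V : List Char) : [c] <:+: V ↔ c ∈ V := by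
  constructor
  · intro h; exact List.singleton_sublist.mp h.sublist
  · intro h; obtain ⟨s, t, rfl⟩ := List.append_of_mem h; exact ⟨s, t, by simp⟩

theorem pv_infix_pair (a b : Char) : ∀ V : List Char, [a, b] <:+: V ↔ (a, b) ∈ pvPairs none V := by
  intro V
  induction V with
  | nil => simp [pvPairs]
  | cons c cs ih =>
    rw [List.infix_cons_iff, pvPairs_none_eq_zip]
    cases cs with
    | nil => simp [List.cons_prefix_cons]
    | cons d ds =>
      rw [pvPairs_none_eq_zip] at ih
      simp only [List.zip]
      simp [List.cons_prefix_cons, Prod.ext_iff]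
      tauto

theorem pv_isIn_single (sub : String) (c : Char) (h : sub.toList = [c]) (s : String) :
    PySem.Str.isIn sub s = decide (c ∈ s.toList) := by
  apply Bool.eq_iff_iff.mpr
  rw [PySem.Str.isIn_iff_infix, h]
  simp [pv_infix_single]

theorem pv_isIn_pair (sub : String) (a b : Char) (h : sub.toList = [a, b]) (s : String) :
    PySem.Str.isIn sub s = decide ((a, b) ∈ pvPairs none s.toList) := by
  apply Bool.eq_iff_iff.mpr
  rw [PySem.Str.isIn_iff_infix, h]
  simp [pv_infix_pair]

theorem pv_beq_str (a b : String) : (a == b) = decide (a = b) := by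
  apply Bool.eq_iff_iff.mpr; simp


-- refuters: no character / pair below the given threshold occurs, so the fold stays above it
theorem pv_crk_refute (c : Char) (k : Int)
    (h0 : c = 'R' → False) (h1 : 1 ≤ k → c = 'C' → False) (h2 : 2 ≤ k → c = 'D' → False)
    (h4 : 4 ≤ k → c ∈ (['P', 'L', 'W', 'S'] : List Char) → False) (hk : k < 7) :
    ¬ pvCharRank.getD c 7 ≤ k := by
  intro hle
  rcases pv_crk_cases c with ⟨hm, hv⟩ | ⟨hm, hv⟩ | ⟨hm, hv⟩ | ⟨hm, hv⟩ | hv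
  · exact h0 hm
  · exact h1 (by omega) hm
  · exact h2 (by omega) hm
  · exact h4 (by omega) hm
  · omega

theorem pv_prk_refute (pr : Char × Char) (k : Int)
    (h4 : 4 ≤ k → pr ∈ ([('b','r'), ('b','n'), ('b','o'), ('r','i')] : List (Char × Char)) → False)
    (h5 : 5 ≤ k → pr ∈ ([('s','t'), ('c','h'), ('c','m'), ('t','d')] : List (Char × Char)) → False)
    (h6 : 6 ≤ k → pr ∈ ([('p','i'), ('p','t'), ('p','s'), ('p','c'), ('e','l'), ('a','r'),
        ('s','p'), ('d','f'), ('s','f'), ('g','s'), ('b','w'), ('o','l')] : List (Char × Char)) → False)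
    (hk : k < 7) : ¬ pvPairRank.getD pr 7 ≤ k := by
  intro hle
  rcases pv_prk_cases pr with ⟨hm, hv⟩ | ⟨hm, hv⟩ | ⟨hm, hv⟩ | hv
  · exact h4 (by omega) hm
  · exact h5 (by omega) hm
  · exact h6 (by omega) hm
  · omega

theorem pv_trk_refute (c : Char) (k : Int)
    (h0 : c = 'c' → False) (h1 : 1 ≤ k → c = 'g' → False) (h2 : 2 ≤ k → c = 'p' → False)
    (h4 : 4 ≤ k → c = 'e' → False) (h5 : 5 ≤ k → c = 'G' → False) (h6 : 6 ≤ k → c = 'j' → False)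
    (h7 : 7 ≤ k → c = 'M' → False) (h8 : 8 ≤ k → c = 'm' → False) (hk : k < 9) :
    ¬ pvTreasureRank.getD c 9 ≤ k := by
  intro hle
  rcases pv_trk_cases c with ⟨hm, hv⟩ | ⟨hm, hv⟩ | ⟨hm, hv⟩ | ⟨hm, hv⟩ | ⟨hm, hv⟩ | ⟨hm, hv⟩ |
    ⟨hm, hv⟩ | ⟨hm, hv⟩ | hv
  · exact h0 hm
  · exact h1 (by omega) hm
  · exact h2 (by omega) hm
  · exact h4 (by omega) hm
  · exact h5 (by omega) hm
  · exact h6 (by omega) hm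
  · exact h7 (by omega) hm
  · exact h8 (by omega) hm
  · omega

theorem pv_best_not_le (V : List Char) (k : Int) (hk : k < 7)
    (hchar : ∀ c ∈ V, ¬ pvCharRank.getD c 7 ≤ k)
    (hpair : ∀ pr ∈ pvPairs none V, ¬ pvPairRank.getD pr 7 ≤ k) : ¬ pvBest none V ≤ k := by
  intro hle
  rcases (pvBest_le_iff k hk none V).mp hle with ⟨c, h1, h2⟩ | ⟨pr, h1, h2⟩
  · exact hchar c h1 h2
  · exact hpair pr h1 h2

theorem pv_tb_not_le (V : List Char) (k : Int) (hk : k < 9)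
    (h : ∀ c ∈ V, ¬ pvTreasureRank.getD c 9 ≤ k) : ¬ pvTB V ≤ k := by
  intro hle
  rcases (pvTB_le_iff k hk V).mp hle with ⟨c, h1, h2⟩
  exact h c h1 h2

theorem pv_main (cv : String) : get_cell_colors cv = get_cell_colors_alt cv := by
  by_cases hB : cv = "B"
  · subst hB; rfl
  by_cases hO : cv = "O"
  · subst hO; rfl
  have hgot : pvExact.get? cv = none := by
    simp [pvExact, PySem.Dict.ofList, PySem.Dict.update, List.foldl, PySem.Dict.get?_insert,
      PySem.Dict.get?_empty, hB, hO]
  have halt : get_cell_colors_alt cv =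
      (if pvBest none cv.toList = 0 then
        (pvTreasureFill.getD
          (if ('s' ∈ cv.toList ∧ ¬ ('s','d') ∈ pvPairs none cv.toList)
            then min (pvTB cv.toList) 3 else pvTB cv.toList) "#4a4a4a", "#6a6a6a")
      else pvRankColors.getD (pvBest none cv.toList) ("#1a1a1a", "#333333")) := by
    unfold get_cell_colors_alt
    rw [hgot]
    rw [pv_fold_spec cv.toList 7 9 false false none (by omega) (by omega)]
    rw [min_eq_right (pvBest_le7 none cv.toList), min_eq_right (pvTB_le9 cv.toList)]
    simp only [Bool.false_or, pvHasS_eq, pvHasSD_eq, beq_iff_eq, Bool.and_eq_true,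
      Bool.not_eq_true', decide_eq_true_eq, decide_eq_false_iff_not]
  rw [halt]
  unfold get_cell_colors
  rw [pv_beq_str cv "B", pv_beq_str cv "O"]
  simp only [List.any_cons, List.any_nil,
    pv_isIn_single "R" 'R' rfl, pv_isIn_single "c" 'c' rfl, pv_isIn_single "g" 'g' rfl,
    pv_isIn_single "p" 'p' rfl, pv_isIn_single "s" 's' rfl, pv_isIn_single "e" 'e' rfl,
    pv_isIn_single "G" 'G' rfl, pv_isIn_single "j" 'j' rfl, pv_isIn_single "M" 'M' rfl,
    pv_isIn_single "m" 'm' rfl, pv_isIn_single "C" 'C' rfl, pv_isIn_single "D" 'D' rfl,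
    pv_isIn_single "P" 'P' rfl, pv_isIn_single "L" 'L' rfl, pv_isIn_single "W" 'W' rfl,
    pv_isIn_single "S" 'S' rfl,
    pv_isIn_pair "sd" 's' 'd' rfl, pv_isIn_pair "CH" 'C' 'H' rfl,
    pv_isIn_pair "br" 'b' 'r' rfl, pv_isIn_pair "bn" 'b' 'n' rfl, pv_isIn_pair "bo" 'b' 'o' rfl,
    pv_isIn_pair "ri" 'r' 'i' rfl, pv_isIn_pair "st" 's' 't' rfl, pv_isIn_pair "ch" 'c' 'h' rfl,
    pv_isIn_pair "cm" 'c' 'm' rfl, pv_isIn_pair "td" 't' 'd' rfl,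
    pv_isIn_pair "pi" 'p' 'i' rfl, pv_isIn_pair "pt" 'p' 't' rfl, pv_isIn_pair "ps" 'p' 's' rfl,
    pv_isIn_pair "pc" 'p' 'c' rfl, pv_isIn_pair "el" 'e' 'l' rfl, pv_isIn_pair "ar" 'a' 'r' rfl,
    pv_isIn_pair "sp" 's' 'p' rfl, pv_isIn_pair "df" 'd' 'f' rfl, pv_isIn_pair "sf" 's' 'f' rfl,
    pv_isIn_pair "gs" 'g' 's' rfl, pv_isIn_pair "bw" 'b' 'w' rfl, pv_isIn_pair "ol" 'o' 'l' rfl,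
    Bool.or_eq_true, Bool.and_eq_true, Bool.not_eq_true', Bool.or_false,
    decide_eq_true_eq, decide_eq_false_iff_not]
  rw [if_neg hB, if_neg hO]
  by_cases hR : 'R' ∈ cv.toList
  · -- Room
    have hb0 : pvBest none cv.toList = 0 := by
      have h1 := (pvBest_le_iff 0 (by omega) none cv.toList).mpr (Or.inl ⟨'R', hR, by decide⟩)
      have h2 := pvBest_nonneg none cv.toList
      omega
    rw [if_pos hR, if_pos hb0]
    have htnn := pvTB_nonneg cv.toList
    by_cases hc : 'c' ∈ cv.toList
    · have htb : pvTB cv.toList = 0 := by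
        have h1 := (pvTB_le_iff 0 (by omega) cv.toList).mpr ⟨'c', hc, by decide⟩
        omega
      rw [if_pos hc, htb]
      split <;> decide
    have hn0 : ¬ pvTB cv.toList ≤ 0 := pv_tb_not_le _ 0 (by omega)
      (fun x hx => pv_trk_refute x 0 (fun h => hc (h ▸ hx)) (fun h _ => absurd h (by omega))
        (fun h _ => absurd h (by omega)) (fun h _ => absurd h (by omega))
        (fun h _ => absurd h (by omega)) (fun h _ => absurd h (by omega))
        (fun h _ => absurd h (by omega)) (fun h _ => absurd h (by omega)) (by omega))
    by_cases hg : 'g' ∈ cv.toList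
    · have htb : pvTB cv.toList = 1 := by
        have h1 := (pvTB_le_iff 1 (by omega) cv.toList).mpr ⟨'g', hg, by decide⟩
        omega
      rw [if_neg hc, if_pos hg, htb]
      split <;> decide
    have hn1 : ¬ pvTB cv.toList ≤ 1 := pv_tb_not_le _ 1 (by omega)
      (fun x hx => pv_trk_refute x 1 (fun h => hc (h ▸ hx)) (fun _ h => hg (h ▸ hx))
        (fun h _ => absurd h (by omega)) (fun h _ => absurd h (by omega))
        (fun h _ => absurd h (by omega)) (fun h _ => absurd h (by omega))
        (fun h _ => absurd h (by omega)) (fun h _ => absurd h (by omega)) (by omega))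
    by_cases hp : 'p' ∈ cv.toList
    · have htb : pvTB cv.toList = 2 := by
        have h1 := (pvTB_le_iff 2 (by omega) cv.toList).mpr ⟨'p', hp, by decide⟩
        omega
      rw [if_neg hc, if_neg hg, if_pos hp, htb]
      split <;> decide
    have hn2 : ¬ pvTB cv.toList ≤ 2 := pv_tb_not_le _ 2 (by omega)
      (fun x hx => pv_trk_refute x 2 (fun h => hc (h ▸ hx)) (fun _ h => hg (h ▸ hx))
        (fun _ h => hp (h ▸ hx)) (fun h _ => absurd h (by omega))
        (fun h _ => absurd h (by omega)) (fun h _ => absurd h (by omega))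
        (fun h _ => absurd h (by omega)) (fun h _ => absurd h (by omega)) (by omega))
    have hn3 : ¬ pvTB cv.toList ≤ 3 := pv_tb_not_le _ 3 (by omega)
      (fun x hx => pv_trk_refute x 3 (fun h => hc (h ▸ hx)) (fun _ h => hg (h ▸ hx))
        (fun _ h => hp (h ▸ hx)) (fun h _ => absurd h (by omega))
        (fun h _ => absurd h (by omega)) (fun h _ => absurd h (by omega))
        (fun h _ => absurd h (by omega)) (fun h _ => absurd h (by omega)) (by omega))
    by_cases hsil : ('s' ∈ cv.toList ∧ ¬ ('s','d') ∈ pvPairs none cv.toList)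
    · rw [if_neg hc, if_neg hg, if_neg hp, if_pos hsil, if_pos hsil]
      have : min (pvTB cv.toList) 3 = 3 := by omega
      rw [this]
      decide
    rw [if_neg hc, if_neg hg, if_neg hp, if_neg hsil, if_neg hsil]
    by_cases he : 'e' ∈ cv.toList
    · have htb : pvTB cv.toList = 4 := by
        have h1 := (pvTB_le_iff 4 (by omega) cv.toList).mpr ⟨'e', he, by decide⟩
        omega
      rw [if_pos he, htb]
      decide
    have hn4 : ¬ pvTB cv.toList ≤ 4 := pv_tb_not_le _ 4 (by omega)
      (fun x hx => pv_trk_refute x 4 (fun h => hc (h ▸ hx)) (fun _ h => hg (h ▸ hx))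
        (fun _ h => hp (h ▸ hx)) (fun _ h => he (h ▸ hx))
        (fun h _ => absurd h (by omega)) (fun h _ => absurd h (by omega))
        (fun h _ => absurd h (by omega)) (fun h _ => absurd h (by omega)) (by omega))
    by_cases hG : 'G' ∈ cv.toList
    · have htb : pvTB cv.toList = 5 := by
        have h1 := (pvTB_le_iff 5 (by omega) cv.toList).mpr ⟨'G', hG, by decide⟩
        omega
      rw [if_neg he, if_pos hG, htb]
      decide
    have hn5 : ¬ pvTB cv.toList ≤ 5 := pv_tb_not_le _ 5 (by omega)
      (fun x hx => pv_trk_refute x 5 (fun h => hc (h ▸ hx)) (fun _ h => hg (h ▸ hx))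
        (fun _ h => hp (h ▸ hx)) (fun _ h => he (h ▸ hx)) (fun _ h => hG (h ▸ hx))
        (fun h _ => absurd h (by omega)) (fun h _ => absurd h (by omega))
        (fun h _ => absurd h (by omega)) (by omega))
    by_cases hj : 'j' ∈ cv.toList
    · have htb : pvTB cv.toList = 6 := by
        have h1 := (pvTB_le_iff 6 (by omega) cv.toList).mpr ⟨'j', hj, by decide⟩
        omega
      rw [if_neg he, if_neg hG, if_pos hj, htb]
      decide
    have hn6 : ¬ pvTB cv.toList ≤ 6 := pv_tb_not_le _ 6 (by omega)
      (fun x hx => pv_trk_refute x 6 (fun h => hc (h ▸ hx)) (fun _ h => hg (h ▸ hx))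
        (fun _ h => hp (h ▸ hx)) (fun _ h => he (h ▸ hx)) (fun _ h => hG (h ▸ hx))
        (fun _ h => hj (h ▸ hx)) (fun h _ => absurd h (by omega))
        (fun h _ => absurd h (by omega)) (by omega))
    by_cases hM : 'M' ∈ cv.toList
    · have htb : pvTB cv.toList = 7 := by
        have h1 := (pvTB_le_iff 7 (by omega) cv.toList).mpr ⟨'M', hM, by decide⟩
        omega
      rw [if_neg he, if_neg hG, if_neg hj, if_pos hM, htb]
      decide
    have hn7 : ¬ pvTB cv.toList ≤ 7 := pv_tb_not_le _ 7 (by omega)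
      (fun x hx => pv_trk_refute x 7 (fun h => hc (h ▸ hx)) (fun _ h => hg (h ▸ hx))
        (fun _ h => hp (h ▸ hx)) (fun _ h => he (h ▸ hx)) (fun _ h => hG (h ▸ hx))
        (fun _ h => hj (h ▸ hx)) (fun _ h => hM (h ▸ hx))
        (fun h _ => absurd h (by omega)) (by omega))
    by_cases hm : 'm' ∈ cv.toList
    · have htb : pvTB cv.toList = 8 := by
        have h1 := (pvTB_le_iff 8 (by omega) cv.toList).mpr ⟨'m', hm, by decide⟩
        omega
      rw [if_neg he, if_neg hG, if_neg hj, if_neg hM, if_pos hm, htb]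
      decide
    have hn8 : ¬ pvTB cv.toList ≤ 8 := pv_tb_not_le _ 8 (by omega)
      (fun x hx => pv_trk_refute x 8 (fun h => hc (h ▸ hx)) (fun _ h => hg (h ▸ hx))
        (fun _ h => hp (h ▸ hx)) (fun _ h => he (h ▸ hx)) (fun _ h => hG (h ▸ hx))
        (fun _ h => hj (h ▸ hx)) (fun _ h => hM (h ▸ hx)) (fun _ h => hm (h ▸ hx)) (by omega))
    have htb : pvTB cv.toList = 9 := by
      have h1 := pvTB_le9 cv.toList
      omega
    rw [if_neg he, if_neg hG, if_neg hj, if_neg hM, if_neg hm, htb]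
    decide
  · -- not a room
    have hn0 : ¬ pvBest none cv.toList ≤ 0 := pv_best_not_le cv.toList 0 (by omega)
      (fun c hx => pv_crk_refute c 0 (fun h => hR (h ▸ hx)) (fun h _ => absurd h (by omega))
        (fun h _ => absurd h (by omega)) (fun h _ => absurd h (by omega)) (by omega))
      (fun pr hx => pv_prk_refute pr 0 (fun h _ => absurd h (by omega))
        (fun h _ => absurd h (by omega)) (fun h _ => absurd h (by omega)) (by omega))
    have hne0 : ¬ pvBest none cv.toList = 0 := by omega
    rw [if_neg hR, if_neg hne0]
    by_cases hC : 'C' ∈ cv.toList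
    · have hb : pvBest none cv.toList = 1 := by
        have h1 := (pvBest_le_iff 1 (by omega) none cv.toList).mpr (Or.inl ⟨'C', hC, by decide⟩)
        omega
      rw [if_pos hC, hb]
      decide
    have hn1 : ¬ pvBest none cv.toList ≤ 1 := pv_best_not_le cv.toList 1 (by omega)
      (fun c hx => pv_crk_refute c 1 (fun h => hR (h ▸ hx)) (fun _ h => hC (h ▸ hx))
        (fun h _ => absurd h (by omega)) (fun h _ => absurd h (by omega)) (by omega))
      (fun pr hx => pv_prk_refute pr 1 (fun h _ => absurd h (by omega))
        (fun h _ => absurd h (by omega)) (fun h _ => absurd h (by omega)) (by omega))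
    by_cases hD : 'D' ∈ cv.toList
    · have hb : pvBest none cv.toList = 2 := by
        have h1 := (pvBest_le_iff 2 (by omega) none cv.toList).mpr (Or.inl ⟨'D', hD, by decide⟩)
        omega
      rw [if_neg hC, if_pos hD, hb]
      decide
    have hn3 : ¬ pvBest none cv.toList ≤ 3 := pv_best_not_le cv.toList 3 (by omega)
      (fun c hx => pv_crk_refute c 3 (fun h => hR (h ▸ hx)) (fun _ h => hC (h ▸ hx))
        (fun _ h => hD (h ▸ hx)) (fun h _ => absurd h (by omega)) (by omega))
      (fun pr hx => pv_prk_refute pr 3 (fun h _ => absurd h (by omega))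
        (fun h _ => absurd h (by omega)) (fun h _ => absurd h (by omega)) (by omega))
    have hCH : ¬ ('C', 'H') ∈ pvPairs none cv.toList := fun h => hC (pv_pair_mem_left h)
    rw [if_neg hC, if_neg hD, if_neg hCH]
    by_cases hW : ('P' ∈ cv.toList ∨ 'L' ∈ cv.toList ∨ 'W' ∈ cv.toList ∨ 'S' ∈ cv.toList ∨
        ('b', 'r') ∈ pvPairs none cv.toList ∨ ('b', 'n') ∈ pvPairs none cv.toList ∨
        ('b', 'o') ∈ pvPairs none cv.toList ∨ ('r', 'i') ∈ pvPairs none cv.toList)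
    · have hb : pvBest none cv.toList = 4 := by
        have h1 : pvBest none cv.toList ≤ 4 := by
          rcases hW with h | h | h | h | h | h | h | h
          · exact (pvBest_le_iff 4 (by omega) none cv.toList).mpr (Or.inl ⟨'P', h, by decide⟩)
          · exact (pvBest_le_iff 4 (by omega) none cv.toList).mpr (Or.inl ⟨'L', h, by decide⟩)
          · exact (pvBest_le_iff 4 (by omega) none cv.toList).mpr (Or.inl ⟨'W', h, by decide⟩)
          · exact (pvBest_le_iff 4 (by omega) none cv.toList).mpr (Or.inl ⟨'S', h, by decide⟩)
          · exact (pvBest_le_iff 4 (by omega) none cv.toList).mpr (Or.inr ⟨('b','r'), h, by decide⟩)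
          · exact (pvBest_le_iff 4 (by omega) none cv.toList).mpr (Or.inr ⟨('b','n'), h, by decide⟩)
          · exact (pvBest_le_iff 4 (by omega) none cv.toList).mpr (Or.inr ⟨('b','o'), h, by decide⟩)
          · exact (pvBest_le_iff 4 (by omega) none cv.toList).mpr (Or.inr ⟨('r','i'), h, by decide⟩)
        omega
      rw [if_pos hW, hb]
      decide
    rw [not_or, not_or, not_or, not_or, not_or, not_or, not_or] at hW
    obtain ⟨hnP, hnL, hnW, hnS, hnbr, hnbn, hnbo, hnri⟩ := hW
    have hn4 : ¬ pvBest none cv.toList ≤ 4 := pv_best_not_le cv.toList 4 (by omega)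
      (fun c hx => pv_crk_refute c 4 (fun h => hR (h ▸ hx)) (fun _ h => hC (h ▸ hx))
        (fun _ h => hD (h ▸ hx))
        (fun _ hm => by
          simp only [List.mem_cons, List.not_mem_nil, or_false] at hm
          rcases hm with rfl | rfl | rfl | rfl
          exacts [hnP hx, hnL hx, hnW hx, hnS hx]) (by omega))
      (fun pr hx => pv_prk_refute pr 4
        (fun _ hm => by
          simp only [List.mem_cons, List.not_mem_nil, or_false] at hm
          rcases hm with rfl | rfl | rfl | rfl
          exacts [hnbr hx, hnbn hx, hnbo hx, hnri hx])
        (fun h _ => absurd h (by omega)) (fun h _ => absurd h (by omega)) (by omega))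
    have hWfalse : ¬ ('P' ∈ cv.toList ∨ 'L' ∈ cv.toList ∨ 'W' ∈ cv.toList ∨ 'S' ∈ cv.toList ∨
        ('b', 'r') ∈ pvPairs none cv.toList ∨ ('b', 'n') ∈ pvPairs none cv.toList ∨
        ('b', 'o') ∈ pvPairs none cv.toList ∨ ('r', 'i') ∈ pvPairs none cv.toList) := by
      rintro (h | h | h | h | h | h | h | h)
      exacts [hnP h, hnL h, hnW h, hnS h, hnbr h, hnbn h, hnbo h, hnri h]
    rw [if_neg hWfalse]
    by_cases hS5 : (('s', 't') ∈ pvPairs none cv.toList ∨ ('c', 'h') ∈ pvPairs none cv.toList ∨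
        ('c', 'm') ∈ pvPairs none cv.toList ∨ ('t', 'd') ∈ pvPairs none cv.toList)
    · have hb : pvBest none cv.toList = 5 := by
        have h1 : pvBest none cv.toList ≤ 5 := by
          rcases hS5 with h | h | h | h
          · exact (pvBest_le_iff 5 (by omega) none cv.toList).mpr (Or.inr ⟨('s','t'), h, by decide⟩)
          · exact (pvBest_le_iff 5 (by omega) none cv.toList).mpr (Or.inr ⟨('c','h'), h, by decide⟩)
          · exact (pvBest_le_iff 5 (by omega) none cv.toList).mpr (Or.inr ⟨('c','m'), h, by decide⟩)
          · exact (pvBest_le_iff 5 (by omega) none cv.toList).mpr (Or.inr ⟨('t','d'), h, by decide⟩)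
        omega
      rw [if_pos hS5, hb]
      decide
    rw [not_or, not_or, not_or] at hS5
    obtain ⟨hnst, hnch, hncm, hntd⟩ := hS5
    have hn5 : ¬ pvBest none cv.toList ≤ 5 := pv_best_not_le cv.toList 5 (by omega)
      (fun c hx => pv_crk_refute c 5 (fun h => hR (h ▸ hx)) (fun _ h => hC (h ▸ hx))
        (fun _ h => hD (h ▸ hx))
        (fun _ hm => by
          simp only [List.mem_cons, List.not_mem_nil, or_false] at hm
          rcases hm with rfl | rfl | rfl | rfl
          exacts [hnP hx, hnL hx, hnW hx, hnS hx]) (by omega))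
      (fun pr hx => pv_prk_refute pr 5
        (fun _ hm => by
          simp only [List.mem_cons, List.not_mem_nil, or_false] at hm
          rcases hm with rfl | rfl | rfl | rfl
          exacts [hnbr hx, hnbn hx, hnbo hx, hnri hx])
        (fun _ hm => by
          simp only [List.mem_cons, List.not_mem_nil, or_false] at hm
          rcases hm with rfl | rfl | rfl | rfl
          exacts [hnst hx, hnch hx, hncm hx, hntd hx])
        (fun h _ => absurd h (by omega)) (by omega))
    have hS5false : ¬ (('s', 't') ∈ pvPairs none cv.toList ∨ ('c', 'h') ∈ pvPairs none cv.toList ∨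
        ('c', 'm') ∈ pvPairs none cv.toList ∨ ('t', 'd') ∈ pvPairs none cv.toList) := by
      rintro (h | h | h | h)
      exacts [hnst h, hnch h, hncm h, hntd h]
    rw [if_neg hS5false]
    by_cases hT : (('p', 'i') ∈ pvPairs none cv.toList ∨ ('p', 't') ∈ pvPairs none cv.toList ∨
        ('p', 's') ∈ pvPairs none cv.toList ∨ ('p', 'c') ∈ pvPairs none cv.toList ∨
        ('e', 'l') ∈ pvPairs none cv.toList ∨ ('a', 'r') ∈ pvPairs none cv.toList ∨
        ('s', 'p') ∈ pvPairs none cv.toList ∨ ('d', 'f') ∈ pvPairs none cv.toList ∨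
        ('s', 'f') ∈ pvPairs none cv.toList ∨ ('g', 's') ∈ pvPairs none cv.toList ∨
        ('b', 'w') ∈ pvPairs none cv.toList ∨ ('o', 'l') ∈ pvPairs none cv.toList)
    · have hb : pvBest none cv.toList = 6 := by
        have h1 : pvBest none cv.toList ≤ 6 := by
          rcases hT with h | h | h | h | h | h | h | h | h | h | h | h
          · exact (pvBest_le_iff 6 (by omega) none cv.toList).mpr (Or.inr ⟨('p','i'), h, by decide⟩)
          · exact (pvBest_le_iff 6 (by omega) none cv.toList).mpr (Or.inr ⟨('p','t'), h, by decide⟩)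
          · exact (pvBest_le_iff 6 (by omega) none cv.toList).mpr (Or.inr ⟨('p','s'), h, by decide⟩)
          · exact (pvBest_le_iff 6 (by omega) none cv.toList).mpr (Or.inr ⟨('p','c'), h, by decide⟩)
          · exact (pvBest_le_iff 6 (by omega) none cv.toList).mpr (Or.inr ⟨('e','l'), h, by decide⟩)
          · exact (pvBest_le_iff 6 (by omega) none cv.toList).mpr (Or.inr ⟨('a','r'), h, by decide⟩)
          · exact (pvBest_le_iff 6 (by omega) none cv.toList).mpr (Or.inr ⟨('s','p'), h, by decide⟩)
          · exact (pvBest_le_iff 6 (by omega) none cv.toList).mpr (Or.inr ⟨('d','f'), h, by decide⟩)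
          · exact (pvBest_le_iff 6 (by omega) none cv.toList).mpr (Or.inr ⟨('s','f'), h, by decide⟩)
          · exact (pvBest_le_iff 6 (by omega) none cv.toList).mpr (Or.inr ⟨('g','s'), h, by decide⟩)
          · exact (pvBest_le_iff 6 (by omega) none cv.toList).mpr (Or.inr ⟨('b','w'), h, by decide⟩)
          · exact (pvBest_le_iff 6 (by omega) none cv.toList).mpr (Or.inr ⟨('o','l'), h, by decide⟩)
        omega
      rw [if_pos hT, hb]
      decide
    rw [not_or, not_or, not_or, not_or, not_or, not_or, not_or, not_or, not_or, not_or, not_or] at hT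
    obtain ⟨hnpi, hnpt, hnps, hnpc, hnel, hnar, hnsp, hndf, hnsf, hngs, hnbw, hnol⟩ := hT
    have hn6 : ¬ pvBest none cv.toList ≤ 6 := pv_best_not_le cv.toList 6 (by omega)
      (fun c hx => pv_crk_refute c 6 (fun h => hR (h ▸ hx)) (fun _ h => hC (h ▸ hx))
        (fun _ h => hD (h ▸ hx))
        (fun _ hm => by
          simp only [List.mem_cons, List.not_mem_nil, or_false] at hm
          rcases hm with rfl | rfl | rfl | rfl
          exacts [hnP hx, hnL hx, hnW hx, hnS hx]) (by omega))
      (fun pr hx => pv_prk_refute pr 6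
        (fun _ hm => by
          simp only [List.mem_cons, List.not_mem_nil, or_false] at hm
          rcases hm with rfl | rfl | rfl | rfl
          exacts [hnbr hx, hnbn hx, hnbo hx, hnri hx])
        (fun _ hm => by
          simp only [List.mem_cons, List.not_mem_nil, or_false] at hm
          rcases hm with rfl | rfl | rfl | rfl
          exacts [hnst hx, hnch hx, hncm hx, hntd hx])
        (fun _ hm => by
          simp only [List.mem_cons, List.not_mem_nil, or_false] at hm
          rcases hm with rfl | rfl | rfl | rfl | rfl | rfl | rfl | rfl | rfl | rfl | rfl | rfl
          exacts [hnpi hx, hnpt hx, hnps hx, hnpc hx, hnel hx, hnar hx, hnsp hx, hndf hx,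
            hnsf hx, hngs hx, hnbw hx, hnol hx]) (by omega))
    have hTfalse : ¬ (('p', 'i') ∈ pvPairs none cv.toList ∨ ('p', 't') ∈ pvPairs none cv.toList ∨
        ('p', 's') ∈ pvPairs none cv.toList ∨ ('p', 'c') ∈ pvPairs none cv.toList ∨
        ('e', 'l') ∈ pvPairs none cv.toList ∨ ('a', 'r') ∈ pvPairs none cv.toList ∨
        ('s', 'p') ∈ pvPairs none cv.toList ∨ ('d', 'f') ∈ pvPairs none cv.toList ∨
        ('s', 'f') ∈ pvPairs none cv.toList ∨ ('g', 's') ∈ pvPairs none cv.toList ∨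
        ('b', 'w') ∈ pvPairs none cv.toList ∨ ('o', 'l') ∈ pvPairs none cv.toList) := by
      rintro (h | h | h | h | h | h | h | h | h | h | h | h)
      exacts [hnpi h, hnpt h, hnps h, hnpc h, hnel h, hnar h, hnsp h, hndf h, hnsf h, hngs h,
        hnbw h, hnol h]
    rw [if_neg hTfalse]
    have hb : pvBest none cv.toList = 7 := by
      have h1 := pvBest_le7 none cv.toList
      omega
    rw [hb]
    decide

-- ===== VERDICT (by name: the statement is the Claim_ definition above) =====
theorem get_cell_colors_spec : Claim_equal_get_cell_colors := by
  intro cv _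
  unfold Spec_get_cell_colors
  exact pv_main cv
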